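-- pv_equiv track=rewrite | github.com/ai-kmu/etc | algorithm/Basic_Class/문제풀이코드/02_Stack/기능개발_youngjun.py | solution
-- ===== SOURCE A (Python) =====
-- from collections import deque
--
-- def solution(progresses, speeds):
--     # progresses queue 생성
--     progresses_queue = deque(progresses)
--     # speeds queue 생성
--     speeds_queue = deque(speeds)
--     answer = []
--
--     # progresses queue가 남아있는 동안
--     while progresses_queue:
--
--         # progresses number 생성
--         progresses_num = 0
--
--         # 작업을 하나씩 늘려준다.
--         for i in range(len(progresses_queue)):
--             progresses_queue[i] += speeds_queue[i]
--
--         # progresses queue가 남아있는 동안, 맨 왼쪽 작업의 진도가 100이 넘어가면 100보다 작은 값이 나올때까지 popleft 하며, progresses num을 늘려준다.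
--         while progresses_queue and progresses_queue[0] >= 100:
--             progresses_queue.popleft()
--             speeds_queue.popleft()
--             progresses_num += 1
--
--         # 만약 progresses num이 0이 아닐 경우 answer에 추가해준다.
--         if progresses_num != 0:
--             answer.append(progresses_num)
--
--     return answer
-- ===== SOURCE B (Python) =====
-- def solution(progresses, speeds):
--     # Closed form: each task finishes after max(1, ceil((100-p)/s)) days;
--     # one pass groups consecutive tasks whose day does not exceed the current group's day.
--     days = [max(1, -((p - 100) // s)) for p, s in zip(progresses, speeds)]
--     if not days:
--         return []
--     answer = []
--     cur, cnt = days[0], 1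
--     for d in days[1:]:
--         if d > cur:
--             answer.append(cnt)
--             cur, cnt = d, 1
--         else:
--             cnt += 1
--     answer.append(cnt)
--     return answer
-- ===== Notes on version B (the rewrite author's own statement) =====
-- stated objective: faster
-- what changed: Replaces A's day-by-day simulation of two deques by computing each task's completion day in closed form (max(1, ceil((100-p)/s))) and grouping consecutive days in one pass over the list.
-- outside the precondition, e.g. on solution([100], [0]): A returns [1], B raises ZeroDivisionError; on solution([50, 150], [60, -1]): A returns [2], B returns [1, 1]; on solution([0], []): A raises IndexError, B returns []
import Mathlib
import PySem

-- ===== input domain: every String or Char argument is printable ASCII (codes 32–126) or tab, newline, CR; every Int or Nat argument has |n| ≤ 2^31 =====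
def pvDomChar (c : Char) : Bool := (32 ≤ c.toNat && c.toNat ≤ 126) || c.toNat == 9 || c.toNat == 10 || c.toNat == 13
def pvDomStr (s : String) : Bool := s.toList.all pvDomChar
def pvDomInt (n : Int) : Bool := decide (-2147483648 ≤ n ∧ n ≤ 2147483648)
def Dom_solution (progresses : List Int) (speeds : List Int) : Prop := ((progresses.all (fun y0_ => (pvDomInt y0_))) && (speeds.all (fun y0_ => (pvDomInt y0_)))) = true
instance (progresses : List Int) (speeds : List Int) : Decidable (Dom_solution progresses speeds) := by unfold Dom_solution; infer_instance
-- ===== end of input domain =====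

-- B replaces A's day-by-day simulation of the two queues by a closed-form completion day
-- per task (max(1, ceil((100-p)/s))) and one grouping pass (objective: faster).

-- ===== PORT A =====
-- A advances every queued task by its speed (the for loop over the deque)
def pvStepDay (q : List (Int × Int)) : List (Int × Int) :=
  q.map (fun ps => (ps.1 + ps.2, ps.2))

-- A's inner while loop: popleft while the front progress is ≥ 100, counting pops
def pvPopCount : List (Int × Int) → Int × List (Int × Int)
  | [] => (0, [])
  | ps :: rest =>
    if ps.1 ≥ 100 then
      let cr := pvPopCount rest
      (cr.1 + 1, cr.2)
    else (0, ps :: rest)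

-- A's outer while loop; the fuel argument only makes the same computation total
-- (under Pre_solution every task finishes within 2^33 days, proved below).
def pvSimLoop : Nat → List (Int × Int) → List Int
  | 0, _ => []
  | _, [] => []
  | Nat.succ fuel, q =>
    let cq := pvPopCount (pvStepDay q)
    (if cq.1 ≠ 0 then [cq.1] else []) ++ pvSimLoop fuel cq.2

def solution (progresses : List Int) (speeds : List Int) : List Int :=
  pvSimLoop 8589934592 (progresses.zip speeds)

-- ===== PORT B =====
-- completion day of one task: max(1, -((p - 100) // s))
def pvDayOf (p s : Int) : Int := max 1 (-(PySem.Int.floordiv (p - 100) s))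

-- B's grouping loop over days[1:] with state (answer, cur, cnt); the answer grows by cons
def pvGroupGo : List Int → Int → Int → List Int
  | [], _, cnt => [cnt]
  | d :: rest, cur, cnt =>
    if d > cur then cnt :: pvGroupGo rest d 1 else pvGroupGo rest cur (cnt + 1)

def solution_alt (progresses : List Int) (speeds : List Int) : List Int :=
  let days := (progresses.zip speeds).map (fun ps => pvDayOf ps.1 ps.2)
  match days with
  | [] => []
  | d :: rest => pvGroupGo rest d 1

-- ===== PRECONDITION & SPEC =====
-- Pre_ excludes: speeds shorter than progresses (A raises IndexError), and a non-positive
-- speed among the used pairs (A then loops forever on most such inputs; where it does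
-- return, B either raises ZeroDivisionError or computes a different completion day).
def Pre_solution (progresses : List Int) (speeds : List Int) : Prop :=
  progresses.length ≤ speeds.length ∧ ∀ ps ∈ progresses.zip speeds, 1 ≤ ps.2
instance (progresses : List Int) (speeds : List Int) : Decidable (Pre_solution progresses speeds) := by
  unfold Pre_solution; infer_instance

def pvWitness_solution : List Int × List Int := ([93, 30, 55], [1, 30, 5])

def Spec_solution (progresses : List Int) (speeds : List Int) (out : List Int) : Prop := out = solution_alt progresses speeds
instance (progresses : List Int) (speeds : List Int) (out : List Int) : Decidable (Spec_solution progresses speeds out) := by unfold Spec_solution; infer_instance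

-- ===== CLAIM (what is proved, stated in full; the proofs are below) =====
def Claim_equal_solution : Prop := ∀ (progresses : List Int) (speeds : List Int), Dom_solution progresses speeds → Pre_solution progresses speeds → Spec_solution progresses speeds (solution progresses speeds)

-- ===== LEMMAS AND PROOFS =====

-- helpers on the list of completion days
def pvDec1 (d : Int) : Int := max 1 (d - 1)

def pvOnesLen : List Int → Int
  | [] => 0
  | d :: rest => if d = 1 then pvOnesLen rest + 1 else 0

def pvDropOnes : List Int → List Int
  | [] => []
  | d :: rest => if d = 1 then pvDropOnes rest else d :: rest

def pvDropOnesQ : List (Int × Int) → List (Int × Int)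
  | [] => []
  | ps :: rest => if pvDayOf ps.1 ps.2 = 1 then pvDropOnesQ rest else ps :: rest

def pvGroupDays : List Int → List Int
  | [] => []
  | d :: rest => pvGroupGo rest d 1

theorem pvDayOf_pos (p s : Int) : 1 ≤ pvDayOf p s := by
  unfold pvDayOf; exact le_max_left _ _

-- master characterisation of the floor division inside pvDayOf; m*s is kept as an
-- atom with the linear facts omega needs
theorem pvDayOf_spec (p s : Int) (hs : 1 ≤ s) :
    ∃ m : Int, pvDayOf p s = max 1 (-m) ∧ m * s ≤ p - 100 ∧ p - 100 < m * s + s ∧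
      (m ≤ -1 → m * s ≤ -s) ∧ (m ≤ -2 → m * s + s ≤ -s) ∧ (-1 ≤ m → -s ≤ m * s) := by
  refine ⟨PySem.Int.floordiv (p - 100) s, rfl, ?_, ?_, ?_, ?_, ?_⟩
  · exact ((PySem.Int.floordiv_eq_iff_of_pos (by omega)).mp rfl).1
  · have h := ((PySem.Int.floordiv_eq_iff_of_pos (a := p - 100) (b := s)
      (q := PySem.Int.floordiv (p - 100) s) (by omega)).mp rfl).2
    have e : (PySem.Int.floordiv (p - 100) s + 1) * s = PySem.Int.floordiv (p - 100) s * s + s := by ring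
    omega
  · intro hm
    have := mul_le_mul_of_nonneg_right hm (by omega : (0:Int) ≤ s)
    have e : (-1 : Int) * s = -s := by ring
    omega
  · intro hm
    have := mul_le_mul_of_nonneg_right (by omega : PySem.Int.floordiv (p - 100) s + 1 ≤ -1) (by omega : (0:Int) ≤ s)
    have e : (PySem.Int.floordiv (p - 100) s + 1) * s = PySem.Int.floordiv (p - 100) s * s + s := by ring
    have e2 : (-1 : Int) * s = -s := by ring
    omega
  · intro hm
    have := mul_le_mul_of_nonneg_right hm (by omega : (0:Int) ≤ s)
    have e : (-1 : Int) * s = -s := by ring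
    omega

theorem pvDayOf_one_iff (p s : Int) (hs : 1 ≤ s) : pvDayOf p s = 1 ↔ p + s ≥ 100 := by
  obtain ⟨m, hm, h1, h2, hneg, hneg2, hpos⟩ := pvDayOf_spec p s hs
  rw [hm]
  constructor
  · intro h
    rcases (show m ≤ -1 ∨ -1 ≤ m by omega) with hc | hc
    · have := hneg hc; omega
    · have := hpos hc; omega
  · intro h
    rcases (show m ≤ -2 ∨ -1 ≤ m by omega) with hc | hc
    · have := hneg2 hc; omega
    · omega

theorem pvDayOf_step (p s : Int) (hs : 1 ≤ s) : pvDayOf (p + s) s = pvDec1 (pvDayOf p s) := by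
  have hk := (PySem.Int.floordiv_eq_iff_of_pos (a := p - 100) (b := s)
      (q := PySem.Int.floordiv (p - 100) s) (by omega)).mp rfl
  set k := PySem.Int.floordiv (p - 100) s with hkdef
  have e1 : (k + 1) * s = k * s + s := by ring
  have e2 : (k + 1 + 1) * s = k * s + s + s := by ring
  have hfd : PySem.Int.floordiv (p + s - 100) s = k + 1 := by
    apply (PySem.Int.floordiv_eq_iff_of_pos (by omega)).mpr
    constructor
    · rw [e1]; omega
    · rw [e2]; omega
  unfold pvDayOf pvDec1
  rw [hfd, ← hkdef]
  omega

theorem pvOnesLen_nonneg : ∀ ds : List Int, 0 ≤ pvOnesLen ds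
  | [] => le_refl 0
  | d :: rest => by
    simp only [pvOnesLen]
    have := pvOnesLen_nonneg rest
    split <;> omega

-- pvPopCount on the stepped queue, in terms of completion days
theorem pvPopCount_spec : ∀ q : List (Int × Int), (∀ ps ∈ q, 1 ≤ ps.2) →
    pvPopCount (pvStepDay q) =
      (pvOnesLen (q.map (fun ps => pvDayOf ps.1 ps.2)), pvStepDay (pvDropOnesQ q))
  | [], _ => rfl
  | ps :: rest, h => by
    have hs : 1 ≤ ps.2 := h ps (by simp)
    have hone := pvDayOf_one_iff ps.1 ps.2 hs
    simp only [pvStepDay, List.map_cons, pvPopCount, pvOnesLen, pvDropOnesQ]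
    by_cases hd : pvDayOf ps.1 ps.2 = 1
    · have hge : ps.1 + ps.2 ≥ 100 := hone.mp hd
      rw [if_pos hge]
      have ih := pvPopCount_spec rest (fun x hx => h x (by simp [hx]))
      simp only [pvStepDay] at ih
      simp [hd, ih]
    · have hlt : ¬ (ps.1 + ps.2 ≥ 100) := fun hc => hd (hone.mpr hc)
      rw [if_neg hlt]
      simp [hd]

theorem pvDropOnesQ_sub : ∀ q : List (Int × Int), ∀ ps ∈ pvDropOnesQ q, ps ∈ q
  | [], _, h => by simp [pvDropOnesQ] at h
  | x :: rest, ps, h => by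
    simp only [pvDropOnesQ] at h
    split at h
    · exact List.mem_cons_of_mem _ (pvDropOnesQ_sub rest ps h)
    · exact h

theorem pvDropOnesQ_days : ∀ q : List (Int × Int),
    (pvDropOnesQ q).map (fun ps => pvDayOf ps.1 ps.2) =
      pvDropOnes (q.map (fun ps => pvDayOf ps.1 ps.2))
  | [] => rfl
  | x :: rest => by
    simp only [pvDropOnesQ, List.map_cons, pvDropOnes]
    split
    · exact pvDropOnesQ_days rest
    · rfl

-- decrementing all days by one (clamped at 1) does not change the grouping
theorem pvGroupGo_dec : ∀ (ds : List Int) (cur cnt : Int), 2 ≤ cur → (∀ d ∈ ds, 1 ≤ d) →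
    pvGroupGo ds cur cnt = pvGroupGo (ds.map pvDec1) (cur - 1) cnt
  | [], _, _, _, _ => rfl
  | d :: rest, cur, cnt, hcur, h => by
    have hd : 1 ≤ d := h d (by simp)
    have hrest : ∀ x ∈ rest, 1 ≤ x := fun x hx => h x (by simp [hx])
    simp only [List.map_cons, pvGroupGo]
    by_cases hgt : d > cur
    · rw [if_pos hgt, if_pos (by unfold pvDec1; omega)]
      have : pvDec1 d = d - 1 := by unfold pvDec1; omega
      rw [this]
      exact congrArg _ (pvGroupGo_dec rest d 1 (by omega) hrest)
    · rw [if_neg hgt, if_neg (by unfold pvDec1; omega)]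
      exact pvGroupGo_dec rest cur (cnt + 1) hcur hrest

-- grouping over a leading block of ones, with accumulator
theorem pvGroupGo_ones : ∀ (ds : List Int) (cnt : Int), (∀ d ∈ ds, 1 ≤ d) →
    pvGroupGo ds 1 cnt = (cnt + pvOnesLen ds) :: pvGroupDays ((pvDropOnes ds).map pvDec1)
  | [], cnt, _ => by simp [pvGroupGo, pvOnesLen, pvDropOnes, pvGroupDays]
  | d :: rest, cnt, h => by
    have hd : 1 ≤ d := h d (by simp)
    have hrest : ∀ x ∈ rest, 1 ≤ x := fun x hx => h x (by simp [hx])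
    simp only [pvGroupGo, pvOnesLen, pvDropOnes]
    by_cases h1 : d = 1
    · rw [if_neg (by omega), if_pos h1, if_pos h1]
      rw [pvGroupGo_ones rest (cnt + 1) hrest]
      norm_num
      ring_nf
    · rw [if_pos (by omega), if_neg h1, if_neg h1]
      simp only [List.map_cons, pvGroupDays]
      have : pvDec1 d = d - 1 := by unfold pvDec1; omega
      rw [this, pvGroupGo_dec rest d 1 (by omega) hrest]
      norm_num

-- one outer iteration of A, expressed on the days list
theorem pvGroup_step (ds : List Int) (h : ∀ d ∈ ds, 1 ≤ d) :
    pvGroupDays ds =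
      (if pvOnesLen ds ≠ 0 then [pvOnesLen ds] else []) ++ pvGroupDays ((pvDropOnes ds).map pvDec1) := by
  cases ds with
  | nil => rfl
  | cons d rest =>
    have hd : 1 ≤ d := h d (by simp)
    have hrest : ∀ x ∈ rest, 1 ≤ x := fun x hx => h x (by simp [hx])
    by_cases h1 : d = 1
    · subst h1
      have hnn := pvOnesLen_nonneg rest
      have e1 : pvOnesLen (1 :: rest) = pvOnesLen rest + 1 := by simp [pvOnesLen]
      have e2 : pvDropOnes (1 :: rest) = pvDropOnes rest := by simp [pvDropOnes]
      rw [e1, e2, if_pos (by omega)]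
      show pvGroupGo rest 1 1 = _
      rw [pvGroupGo_ones rest 1 hrest]
      simp only [List.cons_append, List.nil_append]
      congr 1
      ring
    · simp only [pvGroupDays, pvOnesLen, pvDropOnes, if_neg h1]
      rw [if_neg (by simp)]
      simp only [List.nil_append, List.map_cons]
      have : pvDec1 d = d - 1 := by unfold pvDec1; omega
      rw [this, pvGroupGo_dec rest d 1 (by omega) hrest]

theorem pvSimLoop_nil (fuel : Nat) : pvSimLoop fuel [] = [] := by
  cases fuel <;> rfl

-- main invariant: the simulation equals the grouping of the completion days
theorem pvDropOnesQ_head : ∀ (w : List (Int × Int)) (z : Int × Int) (zr : List (Int × Int)),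
    pvDropOnesQ w = z :: zr → pvDayOf z.1 z.2 ≠ 1
  | [], z, zr, h => by simp [pvDropOnesQ] at h
  | a :: ar, z, zr, h => by
    simp only [pvDropOnesQ] at h
    split at h
    · exact pvDropOnesQ_head ar z zr h
    · rename_i hne
      obtain ⟨h1, _⟩ := List.cons.inj h
      rw [← h1]; exact hne

theorem pvSim_eq_group : ∀ (fuel : Nat) (q : List (Int × Int)),
    (∀ ps ∈ q, 1 ≤ ps.2) → (∀ ps ∈ q, pvDayOf ps.1 ps.2 ≤ (fuel : Int)) →
    pvSimLoop fuel q = pvGroupDays (q.map (fun ps => pvDayOf ps.1 ps.2)) := by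
  intro fuel
  induction fuel with
  | zero =>
    intro q hsp hb
    cases q with
    | nil => rfl
    | cons x rest =>
      exfalso
      have h1 := hb x (by simp)
      have h2 := pvDayOf_pos x.1 x.2
      simp at h1
      omega
  | succ fuel ih =>
    intro q hsp hb
    cases q with
    | nil => rfl
    | cons x rest =>
      have hq : pvSimLoop (fuel + 1) (x :: rest) =
          (if (pvPopCount (pvStepDay (x :: rest))).1 ≠ 0 then [(pvPopCount (pvStepDay (x :: rest))).1] else []) ++
            pvSimLoop fuel (pvPopCount (pvStepDay (x :: rest))).2 := rfl
      rw [hq, pvPopCount_spec (x :: rest) hsp]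
      dsimp only
      rw [pvGroup_step _ (fun d hd => by
        simp only [List.mem_map] at hd
        obtain ⟨y, _, hyeq⟩ := hd
        rw [← hyeq]; exact pvDayOf_pos y.1 y.2)]
      congr 1
      rw [← pvDropOnesQ_days]
      cases hq2e : pvDropOnesQ (x :: rest) with
      | nil => simp [pvStepDay, pvSimLoop_nil, pvGroupDays]
      | cons z zr =>
        rw [← hq2e]
        have hsub : ∀ ps ∈ pvDropOnesQ (x :: rest), ps ∈ x :: rest := pvDropOnesQ_sub _
        have hsp2 : ∀ ps ∈ pvStepDay (pvDropOnesQ (x :: rest)), 1 ≤ ps.2 := by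
          intro ps hps
          simp only [pvStepDay, List.mem_map] at hps
          obtain ⟨y, hy, hyeq⟩ := hps
          have := hsp y (hsub y hy)
          rw [← hyeq]
          exact this
        have hz1 : pvDayOf z.1 z.2 ≠ 1 := pvDropOnesQ_head _ z zr hq2e
        have hz2 : 2 ≤ pvDayOf z.1 z.2 := by
          have := pvDayOf_pos z.1 z.2
          omega
        have hzb : pvDayOf z.1 z.2 ≤ (fuel : Int) + 1 := by
          have hzmem : z ∈ x :: rest := hsub z (by rw [hq2e]; simp)
          have := hb z hzmem
          push_cast at this
          omega
        have hfuel1 : 1 ≤ fuel := by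
          rcases Nat.eq_zero_or_pos fuel with h0 | h0
          · subst h0; simp at hzb; omega
          · omega
        rw [ih (pvStepDay (pvDropOnesQ (x :: rest))) hsp2 (by
          intro ps hps
          simp only [pvStepDay, List.mem_map] at hps
          obtain ⟨y, hy, hyeq⟩ := hps
          have hymem : y ∈ x :: rest := hsub y hy
          have hyb := hb y hymem
          have hys := hsp y hymem
          rw [← hyeq]
          show pvDayOf (y.1 + y.2) y.2 ≤ (fuel : Int)
          rw [pvDayOf_step y.1 y.2 hys]
          unfold pvDec1
          push_cast at hyb
          omega)]
        congr 1
        simp only [pvStepDay, List.map_map]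
        exact List.map_congr_left (fun y hy => pvDayOf_step y.1 y.2 (hsp y (hsub y hy)))

-- fuel bound: within Dom and Pre_, every completion day is at most 2^33
theorem pvDayOf_bound (p s : Int) (hp : -2147483648 ≤ p) (hs : 1 ≤ s) :
    pvDayOf p s ≤ 8589934592 := by
  obtain ⟨m, hm, h1, h2, hneg, hneg2, hpos⟩ := pvDayOf_spec p s hs
  rw [hm]
  rcases (show m ≤ -1 ∨ -1 ≤ m by omega) with hc | hc
  · have := hneg hc
    -- m*s ≤ -s and p - 100 < m*s + s ≤ ... combined with m ≥ m*s/s is not linear;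
    -- instead: m*s + s ≤ 0< bound on m via m ≥ (p-100-s)/s; use m*s ≥ m when m ≤ 0, s ≥ 1
    have hmm : m * s ≤ m := by nlinarith
    omega
  · omega

-- ===== VERDICT (by name: the statement is the Claim_ definition above) =====
theorem solution_spec : Claim_equal_solution := by
  intro progresses speeds hdom hpre
  unfold Spec_solution solution solution_alt
  obtain ⟨hlen, hsp⟩ := hpre
  have := pvSim_eq_group 8589934592 (progresses.zip speeds) hsp (by
    intro ps hps
    obtain ⟨a, b⟩ := ps
    have hpmem : a ∈ progresses := (List.of_mem_zip hps).1
    unfold Dom_solution at hdom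
    simp only [Bool.and_eq_true, List.all_eq_true] at hdom
    have hpd := hdom.1 a hpmem
    unfold pvDomInt at hpd
    simp only [decide_eq_true_eq] at hpd
    exact le_trans (pvDayOf_bound a b hpd.1 (hsp (a, b) hps)) (by norm_num)
  )
  rw [this]
  cases h : (progresses.zip speeds).map (fun ps => pvDayOf ps.1 ps.2) with
  | nil => rfl
  | cons d rest => rfl
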